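-- pv_equiv track=rewrite | github.com/MKKL1/crack-head | src/word_pattern.py | get_word_pattern
-- ===== SOURCE A (Python) =====
-- def get_word_pattern(word: str) -> tuple[int, ...]:
--     word = word.upper()
--     letters = {}
--     result = []
--     next_num = 0
--
--     for letter in word:
--         if letter not in letters:
--             letters[letter] = next_num
--             next_num += 1
--         result.append(letters[letter])
--
--     return tuple(result)
-- ===== SOURCE B (Python) =====
-- def get_word_pattern(word: str) -> tuple[int, ...]:
--     w = word.upper()
--     return tuple(len(set(w[:w.index(ch)])) for ch in w)
-- ===== Notes on version B (the rewrite author's own statement) =====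
-- stated objective: alternative
-- what changed: B drops A's incrementally-built first-seen dict and running counter entirely: each letter's rank is computed independently as the number of distinct letters in the prefix before its first occurrence (len(set(w[:w.index(ch)]))), trading A's O(n) stateful loop for a stateless per-character prefix computation.
import Mathlib
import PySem

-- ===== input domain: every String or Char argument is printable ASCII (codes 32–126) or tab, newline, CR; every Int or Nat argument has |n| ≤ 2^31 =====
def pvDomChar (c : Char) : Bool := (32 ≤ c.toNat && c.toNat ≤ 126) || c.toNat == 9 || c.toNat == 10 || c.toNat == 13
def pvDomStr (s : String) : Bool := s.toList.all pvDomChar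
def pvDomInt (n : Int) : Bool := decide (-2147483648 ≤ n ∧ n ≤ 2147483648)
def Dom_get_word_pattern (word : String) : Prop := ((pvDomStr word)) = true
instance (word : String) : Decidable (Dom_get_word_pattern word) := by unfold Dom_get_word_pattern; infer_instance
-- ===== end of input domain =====

-- B computes each letter's rank statelessly as the number of distinct letters in the prefix
-- before its first occurrence, instead of A's incrementally-built dict + counter (objective: alternative).

-- ===== PORT A =====
-- A's loop: dict of first-seen letters, running counter, result accumulator.
def getwpLoop : List Char → PySem.Dict Char Int → List Int → Int → List Int
  | [], _, result, _ => result
  | c :: rest, letters, result, next_num =>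
    if letters.contains c = false then
      let letters' := letters.insert c next_num
      getwpLoop rest letters' (result ++ [letters'.getD c 0]) (next_num + 1)
    else
      getwpLoop rest letters (result ++ [letters.getD c 0]) next_num

def get_word_pattern (word : String) : List Int :=
  getwpLoop (PySem.Str.upper word).toList PySem.Dict.empty [] 0

-- ===== PORT B =====
-- tuple(len(set(w[:w.index(ch)])) for ch in w); w[:i] with the nonnegative index i = w.index(ch)
-- is exactly List.take i (index? is some for every ch of w).
def get_word_pattern_alt (word : String) : List Int :=
  let w := (PySem.Str.upper word).toList
  w.map (fun c =>
    PySem.Set.len (PySem.Set.ofList (w.take ((PySem.List.index? w c).getD 0))))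

-- ===== PRECONDITION & SPEC =====
def Spec_get_word_pattern (word : String) (out : List Int) : Prop := out = get_word_pattern_alt word
instance (word : String) (out : List Int) : Decidable (Spec_get_word_pattern word out) := by unfold Spec_get_word_pattern; infer_instance

-- ===== CLAIM =====
def Claim_equal_get_word_pattern : Prop := ∀ (word : String), Dom_get_word_pattern word → Spec_get_word_pattern word (get_word_pattern word)

-- ===== LEMMAS AND PROOFS =====

-- Loop invariant for A (dict value at each seen letter = its index in the seen list L,
-- counter = L.length): the final rank of each letter is its index in Set.update L rest.
lemma getwpLoop_eq (rest : List Char) (d : PySem.Dict Char Int) (L : List Char) (acc : List Int)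
    (hk : d.keys = L)
    (hg : ∀ c ∈ L, d.getD c 0 = (((PySem.List.index? L c).getD 0 : Nat) : Int)) :
    getwpLoop rest d acc (L.length : Int) =
      acc ++ rest.map (fun c => (((PySem.List.index? (PySem.Set.update L rest) c).getD 0 : Nat) : Int)) := by
  induction rest generalizing d L acc with
  | nil => simp [getwpLoop]
  | cons c rest ih =>
    have hcontains : d.contains c = decide (c ∈ L) := by
      rw [PySem.Dict.contains_eq_decide_mem_keys, hk]
    by_cases hc : c ∈ L
    · have hupd : PySem.Set.update L (c :: rest) = PySem.Set.update L rest := by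
        rw [PySem.Set.update_cons]
        congr 1
        simp [PySem.Set.add, PySem.Set.contains_eq_listContains, hc]
      rw [hupd]
      simp only [getwpLoop, hcontains, hc, decide_true]
      rw [ih d L _ hk hg]
      have hidx : PySem.List.index? (PySem.Set.update L rest) c = PySem.List.index? L c := by
        rw [PySem.Set.update_eq_append_filter, PySem.List.index?_append_of_mem _ hc]
      simp only [List.map_cons]
      rw [hidx, hg c hc, List.append_assoc, List.singleton_append]
      simp
    · have hnc : d.contains c = false := by simp [hcontains, hc]
      simp only [getwpLoop, hnc]
      have hkeys' : (d.insert c (L.length : Int)).keys = L ++ [c] := by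
        rw [PySem.Dict.keys_insert_of_not_contains d (L.length : Int) hnc, hk]
      have hadd : PySem.Set.add L c = L ++ [c] := by
        simp [PySem.Set.add, PySem.Set.contains_eq_listContains, hc]
      have hidxc : PySem.List.index? (L ++ [c]) c = some L.length :=
        PySem.List.index?_append_singleton_self L c hc
      have hg' : ∀ c' ∈ L ++ [c],
          (d.insert c (L.length : Int)).getD c' 0 =
            (((PySem.List.index? (L ++ [c]) c').getD 0 : Nat) : Int) := by
        intro c' hc'
        rcases List.mem_append.1 hc' with h | h
        · have hne : c' ≠ c := fun he => hc (he ▸ h)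
          rw [PySem.Dict.getD_insert_of_ne d ((L.length : Nat) : Int) 0 hne,
            PySem.List.index?_append_of_mem _ h]
          exact hg c' h
        · have he : c' = c := by simpa using h
          subst he
          rw [PySem.Dict.getD_insert_self, hidxc]
          simp
      have hlen : ((L ++ [c]).length : Int) = (L.length : Int) + 1 := by simp
      rw [PySem.Dict.getD_insert_self, ← hlen, ih _ (L ++ [c]) _ hkeys' hg']
      have hupd : PySem.Set.update L (c :: rest) = PySem.Set.update (L ++ [c]) rest := by
        rw [PySem.Set.update_cons, hadd]
      have hfin : PySem.List.index? (PySem.Set.update (L ++ [c]) rest) c = some L.length := by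
        rw [PySem.Set.update_eq_append_filter,
          PySem.List.index?_append_of_mem _ (by simp : c ∈ L ++ [c]), hidxc]
      rw [hupd]
      simp only [List.map_cons]
      rw [hfin, List.append_assoc, List.singleton_append]
      simp

-- Bridge between the two formulations: the index of c among the first occurrences of w
-- (seeded with any set s not containing c) is the number of distinct elements accumulated
-- up to c's first occurrence in w.
lemma index_update_eq_len_take (w : List Char) (s : PySem.Set Char) (c : Char)
    (hc : c ∈ w) (hs : c ∉ s) :
    PySem.List.index? (PySem.Set.update s w) c =
      some ((PySem.Set.update s (w.take ((PySem.List.index? w c).getD 0))).length) := by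
  induction w generalizing s with
  | nil => cases hc
  | cons a rest ih =>
    by_cases hca : c = a
    · subst hca
      rw [PySem.List.index?_cons_self]
      simp only [Option.getD_some, List.take_zero, PySem.Set.update_nil]
      rw [PySem.Set.update_cons, PySem.Set.add_of_not_mem hs,
        PySem.Set.update_eq_append_filter,
        PySem.List.index?_append_of_mem _ (by simp : c ∈ s ++ [c]),
        PySem.List.index?_append_singleton_self s c hs]
    · have hcr : c ∈ rest := by
        rcases List.mem_cons.1 hc with h | h
        · exact absurd h hca
        · exact h
      obtain ⟨k, hk⟩ := Option.isSome_iff_exists.1 ((PySem.List.index?_isSome_iff _ _).2 hcr)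
      rw [PySem.List.index?_cons_of_ne rest (Ne.symm hca), hk]
      simp only [Option.map_some, Option.getD_some, List.take_succ_cons]
      rw [PySem.Set.update_cons, PySem.Set.update_cons]
      have hs' : c ∉ PySem.Set.add s a := by
        intro h
        rcases (PySem.Set.mem_add _ _ _).1 h with h | h
        · exact hs h
        · exact hca h
      have := ih (PySem.Set.add s a) hcr hs'
      rw [hk] at this
      simpa using this

-- ===== VERDICT =====
theorem get_word_pattern_spec : Claim_equal_get_word_pattern := by
  intro word _
  unfold Spec_get_word_pattern get_word_pattern get_word_pattern_alt
  have h := getwpLoop_eq (PySem.Str.upper word).toList PySem.Dict.empty [] []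
    (by simp [PySem.Dict.keys_empty]) (by intro c hc; simp at hc)
  simp only [List.length_nil, Nat.cast_zero] at h
  rw [h]
  simp only [List.nil_append]
  apply List.map_congr_left
  intro c hc
  have := index_update_eq_len_take (PySem.Str.upper word).toList [] c hc (by simp)
  rw [this]
  simp [PySem.Set.len, PySem.Set.update_nil_left]
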